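-- pv_equiv track=rewrite | github.com/BYU-CPC/kattis | ada/tylanmm.py | solve
-- ===== SOURCE A (Python) =====
-- def solve(v):
--     if all([val == v[0] for val in v]):
--         return 0, v[-1]
--
--     newV = []
--     for i in range(1, len(v)):
--         newV.append(v[i] - v[i-1])
--     deg, diff = solve(newV)
--     return deg+1, v[-1] + diff
-- ===== SOURCE B (Python) =====
-- def solve(v):
--     deg = 0
--     total = 0
--     cur = v
--     while not all(x == cur[0] for x in cur):
--         total += cur[-1]
--         cur = [b - a for a, b in zip(cur, cur[1:])]
--         deg += 1
--     return deg, total + cur[-1]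
-- ===== Notes on version B (the rewrite author's own statement) =====
-- stated objective: alternative
-- what changed: Replaces A's recursion (difference list built by an index loop with repeated append, result combined on the way back) with an explicit while loop over shrinking zip-based difference lists carrying degree and total accumulators.
import Mathlib
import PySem

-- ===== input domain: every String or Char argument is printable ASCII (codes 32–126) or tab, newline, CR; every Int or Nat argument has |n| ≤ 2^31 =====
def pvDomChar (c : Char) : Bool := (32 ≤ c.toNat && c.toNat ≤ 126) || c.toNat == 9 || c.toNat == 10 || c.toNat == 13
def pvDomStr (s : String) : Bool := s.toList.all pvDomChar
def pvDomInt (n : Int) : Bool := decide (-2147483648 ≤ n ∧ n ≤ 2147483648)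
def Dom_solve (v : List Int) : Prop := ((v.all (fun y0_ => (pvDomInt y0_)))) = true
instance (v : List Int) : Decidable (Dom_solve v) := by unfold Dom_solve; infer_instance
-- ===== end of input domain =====

-- B replaces A's recursion by an explicit while loop over shrinking zip-based difference
-- lists with degree/total accumulators (objective: alternative decomposition).
-- Pre_ excludes the empty list, on which both Pythons raise IndexError (v[-1]).

-- ===== PORT A =====
-- A's inner index loop: for i in range(1, len(v)): newV.append(v[i] - v[i-1])
def solveDiffs (v : List Int) : List Int :=
  (PySem.List.pyRange 1 (v.length : Int) 1).foldl
    (fun acc i => acc ++ [PySem.List.pyGetD v i 0 - PySem.List.pyGetD v (i - 1) 0]) []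

-- characterisation of the loop's result; cited by solve's decreasing_by for termination
theorem solveDiffs_eq (v : List Int) :
    solveDiffs v = (List.range (v.length - 1)).map (fun k => v.getD (k + 1) 0 - v.getD k 0) := by
  unfold solveDiffs
  rw [PySem.List.foldl_append_singleton_eq_map, PySem.List.pyRange_one, List.map_map]
  have h1 : ((v.length : Int) - 1).toNat = v.length - 1 := by omega
  rw [h1]
  refine List.map_congr_left (fun k _ => ?_)
  have e1 : (1 : Int) + (k : Int) = ((k + 1 : Nat) : Int) := by omega
  have e2' : ((k + 1 : Nat) : Int) - 1 = ((k : Nat) : Int) := by omega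
  simp only [Function.comp, e1, e2', PySem.List.pyGetD_natCast]

theorem solveDiffs_length (v : List Int) : (solveDiffs v).length = v.length - 1 := by
  rw [solveDiffs_eq]; simp

def solve (v : List Int) : Int × Int :=
  if (v.map (fun val => val == PySem.List.pyGetD v 0 0)).all (fun b => b) then
    (0, PySem.List.pyGetD v (-1) 0)
  else
    let p := solve (solveDiffs v)
    (p.1 + 1, PySem.List.pyGetD v (-1) 0 + p.2)
termination_by v.length
decreasing_by
  rename_i h
  have hv : v ≠ [] := by intro e; subst e; simp at h
  have h1 := solveDiffs_length v
  have h2 : 0 < v.length := List.length_pos_iff.mpr hv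
  omega

-- ===== PORT B =====
-- cur = [b - a for a, b in zip(cur, cur[1:])]
def altDiffs (cur : List Int) : List Int :=
  (cur.zip (PySem.List.slice cur (some 1) none)).map (fun p => p.2 - p.1)

-- cited by solveLoop's decreasing_by for termination
theorem altDiffs_length (cur : List Int) : (altDiffs cur).length = cur.length - 1 := by
  unfold altDiffs
  rw [PySem.List.slice_from_one]
  simp [List.length_zip]

def solveLoop (cur : List Int) (deg total : Int) : Int × Int :=
  if cur.all (fun x => x == PySem.List.pyGetD cur 0 0) then
    (deg, total + PySem.List.pyGetD cur (-1) 0)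
  else
    solveLoop (altDiffs cur) (deg + 1) (total + PySem.List.pyGetD cur (-1) 0)
termination_by cur.length
decreasing_by
  rename_i h
  have hv : cur ≠ [] := by intro e; subst e; simp at h
  have h1 := altDiffs_length cur
  have h2 : 0 < cur.length := List.length_pos_iff.mpr hv
  omega

def solve_alt (v : List Int) : Int × Int := solveLoop v 0 0

-- ===== PRECONDITION & SPEC =====
-- Pre_ excludes only the empty list, on which Python A raises IndexError (v[-1]).
def Pre_solve (v : List Int) : Prop := v ≠ []
instance (v : List Int) : Decidable (Pre_solve v) := by unfold Pre_solve; infer_instance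
def pvWitness_solve : List Int := [1, 2, 4]

def Spec_solve (v : List Int) (out : Int × Int) : Prop := out = solve_alt v
instance (v : List Int) (out : Int × Int) : Decidable (Spec_solve v out) := by unfold Spec_solve; infer_instance

-- ===== CLAIM (what is proved, stated in full; the proofs are below) =====
def Claim_equal_solve : Prop := ∀ (v : List Int), Dom_solve v → Pre_solve v → Spec_solve v (solve v)

-- ===== LEMMAS AND PROOFS =====
theorem altDiffs_eq_solveDiffs (v : List Int) : altDiffs v = solveDiffs v := by
  rw [solveDiffs_eq]
  unfold altDiffs
  rw [PySem.List.slice_from_one]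
  apply List.ext_getElem
  · simp [List.length_zip]
  · intro k hk hk'
    simp only [List.getElem_map, List.getElem_zip, List.getElem_range] at *
    have hk1 : k + 1 < v.length := by
      simp [List.length_zip] at hk; omega
    rw [List.getD_eq_getElem _ _ hk1, List.getD_eq_getElem _ _ (by omega)]
    simp [List.getElem_tail]

theorem conds_eq (v : List Int) :
    (v.all (fun x => x == PySem.List.pyGetD v 0 0))
      = ((v.map (fun val => val == PySem.List.pyGetD v 0 0)).all (fun b => b)) := by
  rw [List.all_map]; rfl

theorem solveLoop_eq (n : Nat) : ∀ (cur : List Int), cur.length = n → ∀ (d t : Int),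
    solveLoop cur d t = (d + (solve cur).1, t + (solve cur).2) := by
  induction n using Nat.strong_induction_on with
  | _ n ih =>
    intro cur hn d t
    rw [solveLoop, solve]
    rw [conds_eq]
    by_cases h : ((cur.map (fun val => val == PySem.List.pyGetD cur 0 0)).all (fun b => b)) = true
    · simp only [h, if_pos]
      simp
    · rw [if_neg h, if_neg h]
      have hv : cur ≠ [] := by
        intro e; subst e; exact h (by simp)
      have hlen : (altDiffs cur).length < n := by
        have h1 := altDiffs_length cur
        have h2 : 0 < cur.length := List.length_pos_iff.mpr hv
        omega
      rw [ih _ hlen _ rfl, altDiffs_eq_solveDiffs]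
      simp only []
      refine Prod.ext ?_ ?_ <;> simp <;> ring

-- ===== VERDICT (by name: the statement is the Claim_ definition above) =====
theorem solve_spec : Claim_equal_solve := by
  intro v _ _
  unfold Spec_solve solve_alt
  rw [solveLoop_eq v.length v rfl 0 0]
  simp
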